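-- pv_equiv track=rewrite | github.com/yuvalMor27/mamasExersise | algorithmic_python/q3_polyndrom.py | is_sorted_polyndrom
-- ===== SOURCE A (Python) =====
-- def is_sorted_polyndrom(word) -> bool:
--     until_the_middle = word[:len(word)//2]
--     from_the_middle = word[len(word)//2:]
--     if until_the_middle == "".join(sorted(until_the_middle)) and from_the_middle[::-1] == "".join(sorted(from_the_middle[::-1])):
--         for index in range(len(until_the_middle)):
--                 if until_the_middle[index] == from_the_middle[-(index+1)]:
--                     continue
--                 else:
--                     return False
--         return True
--     else:
--         return False
-- ===== SOURCE B (Python) =====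
-- def is_sorted_polyndrom(word) -> bool:
--     # One linear pass over indices instead of sorting each half:
--     # the first half must be non-decreasing, the second half non-increasing,
--     # and the string a palindrome on the mirrored positions.
--     n = len(word)
--     h = n // 2
--     if any(word[i] != word[n - 1 - i] for i in range(h)):
--         return False
--     if any(word[i] > word[i + 1] for i in range(h - 1)):
--         return False
--     return all(word[j] >= word[j + 1] for j in range(h, n - 1))
-- ===== Notes on version B (the rewrite author's own statement) =====
-- stated objective: faster
-- what changed: Replaces sorting each half and joining (O(n log n)) with a single set of linear index scans: mirrored-position palindrome check, non-decreasing first half, non-increasing second half.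
import Mathlib
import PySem

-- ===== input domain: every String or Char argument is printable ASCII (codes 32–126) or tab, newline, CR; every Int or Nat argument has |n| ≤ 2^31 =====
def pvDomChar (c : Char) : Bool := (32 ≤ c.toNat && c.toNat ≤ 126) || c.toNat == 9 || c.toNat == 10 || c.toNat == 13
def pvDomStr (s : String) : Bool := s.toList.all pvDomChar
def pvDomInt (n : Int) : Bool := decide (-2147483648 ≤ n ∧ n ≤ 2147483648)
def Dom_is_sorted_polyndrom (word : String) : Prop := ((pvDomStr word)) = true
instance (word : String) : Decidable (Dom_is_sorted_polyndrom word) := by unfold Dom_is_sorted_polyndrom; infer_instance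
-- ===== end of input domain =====

-- B replaces A's two half-sorts by linear adjacent-pair index scans; proved equal on all inputs.

-- ===== PORT A =====
-- A's for-loop: index over range(len(u)); early return False on a mismatch
def pvLoopA (u f : List Char) (index : Nat) : Bool :=
  if index < u.length then
    if PySem.List.pyGetD u (index : Int) ' ' = PySem.List.pyGetD f (-((index : Int) + 1)) ' '
    then pvLoopA u f (index + 1)
    else false
  else true
termination_by u.length - index

def is_sorted_polyndrom (word : String) : Bool :=
  let w := word.toList
  let m := PySem.Int.floordiv (w.length : Int) 2
  let until_the_middle := PySem.List.slice w none (some m)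
  let from_the_middle := PySem.List.slice w (some m) none
  let from_rev := (PySem.List.slice? from_the_middle none none (-1)).getD []
  if until_the_middle = PySem.List.sorted until_the_middle (fun c => c) false ∧
     from_rev = PySem.List.sorted from_rev (fun c => c) false then
    pvLoopA until_the_middle from_the_middle 0
  else false

-- ===== PORT B =====
def is_sorted_polyndrom_alt (word : String) : Bool :=
  let w := word.toList
  let n := w.length
  let h := n / 2
  if (List.range h).any (fun i => !(w.getD i ' ' == w.getD (n - 1 - i) ' ')) then
    false
  else if (List.range (h - 1)).any (fun i => decide (w.getD (i + 1) ' ' < w.getD i ' ')) then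
    false
  else
    (List.range' h (n - 1 - h)).all (fun j => decide (w.getD (j + 1) ' ' ≤ w.getD j ' '))

-- ===== PRECONDITION & SPEC =====
def Spec_is_sorted_polyndrom (word : String) (out : Bool) : Prop := out = is_sorted_polyndrom_alt word
instance (word : String) (out : Bool) : Decidable (Spec_is_sorted_polyndrom word out) := by unfold Spec_is_sorted_polyndrom; infer_instance

-- ===== CLAIM (what is proved, stated in full; the proofs are below) =====
def Claim_equal_is_sorted_polyndrom : Prop := ∀ (word : String), Dom_is_sorted_polyndrom word → Spec_is_sorted_polyndrom word (is_sorted_polyndrom word)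

-- ===== LEMMAS AND PROOFS =====

-- a list equals its Python sort iff it is non-decreasing
theorem pv_sorted_self_iff (xs : List Char) :
    xs = PySem.List.sorted xs (fun c => c) false ↔ xs.Pairwise (· ≤ ·) := by
  constructor
  · intro h
    have hp := PySem.List.sorted_pairwise (xs := xs) (key := fun c => c)
    rw [← h] at hp
    simpa using hp
  · intro h
    exact (PySem.List.sorted_eq_self_of_pairwise xs (fun c => c) h).symm

-- non-decreasing ↔ adjacent pairs, via getD
theorem pv_pairwise_iff_adj (xs : List Char) :
    xs.Pairwise (· ≤ ·) ↔ ∀ i, i + 1 < xs.length → xs.getD i ' ' ≤ xs.getD (i + 1) ' ' := by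
  rw [← List.isChain_iff_pairwise, List.isChain_iff_getElem]
  constructor
  · intro h i hi
    rw [List.getD_eq_getElem _ _ (by omega), List.getD_eq_getElem _ _ hi]
    exact h i hi
  · intro h i hi
    have := h i hi
    rwa [List.getD_eq_getElem _ _ (by omega), List.getD_eq_getElem _ _ hi] at this

-- A's loop is the mirrored-position check
theorem pv_loopA_iff (u f : List Char) (hlen : u.length ≤ f.length) (k : Nat) :
    pvLoopA u f k = true ↔
      ∀ i, k ≤ i → i < u.length → u.getD i ' ' = f.getD (f.length - (i + 1)) ' ' := by
  fun_induction pvLoopA u f k with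
  | case1 k hk heq ih =>
    have heq' : u.getD k ' ' = f.getD (f.length - (k + 1)) ' ' := by
      have h1 : (-((k : Int) + 1)) = -(((k + 1 : Nat) : Int)) := by push_cast; ring
      rw [h1, PySem.List.pyGetD_neg_natCast f (k + 1) ' ' (by omega) (by omega),
        PySem.List.pyGetD_eq_getElem u ' ' (by omega) (by exact_mod_cast hk)] at heq
      rw [List.getD_eq_getElem _ _ hk, List.getD_eq_getElem _ _ (by omega)]
      simpa using heq
    rw [ih]
    constructor
    · intro H i hki hi
      rcases Nat.eq_or_lt_of_le hki with rfl | hlt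
      · exact heq'
      · exact H i hlt hi
    · intro H i hki hi
      exact H i (by omega) hi
  | case2 k hk heq =>
    have heq' : ¬ u.getD k ' ' = f.getD (f.length - (k + 1)) ' ' := by
      have h1 : (-((k : Int) + 1)) = -(((k + 1 : Nat) : Int)) := by push_cast; ring
      rw [h1, PySem.List.pyGetD_neg_natCast f (k + 1) ' ' (by omega) (by omega),
        PySem.List.pyGetD_eq_getElem u ' ' (by omega) (by exact_mod_cast hk)] at heq
      rw [List.getD_eq_getElem _ _ hk, List.getD_eq_getElem _ _ (by omega)]
      simpa using heq
    simp only [Bool.false_eq_true, false_iff]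
    intro H
    exact absurd (H k le_rfl hk) heq'
  | case3 k hk =>
    simp only [true_iff]
    intro i hki hi; omega

-- getD agrees with getElem in range (specialisation used below)
theorem pv_getD_eq (xs : List Char) (i : Nat) (h : i < xs.length) :
    xs.getD i ' ' = xs[i] := List.getD_eq_getElem xs ' ' h

theorem is_sorted_polyndrom_eq (word : String) :
    is_sorted_polyndrom word = is_sorted_polyndrom_alt word := by
  unfold is_sorted_polyndrom is_sorted_polyndrom_alt
  dsimp only
  set w := word.toList with hw
  set n := w.length with hn
  set h := n / 2 with hh
  have hm : PySem.Int.floordiv (n : Int) 2 = ((h : Nat) : Int) := by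
    exact_mod_cast PySem.Int.floordiv_natCast n 2
  rw [hm, PySem.List.slice_to_natCast, PySem.List.slice_from_natCast,
      PySem.List.slice?_none_none_neg_one]
  simp only [Option.getD_some]
  have hhn : h ≤ n := by omega
  have htl : (w.take h).length = h := by simp; omega
  have hdl : (w.drop h).length = n - h := by simp [hn]
  have hrl : ((w.drop h).reverse).length = n - h := by simp [hn]
  -- characterise each side as a proposition and compare
  rw [Bool.eq_iff_iff]
  constructor
  · intro HA
    -- A returned true: the condition held and the loop passed
    by_cases hc : w.take h = PySem.List.sorted (w.take h) (fun c => c) false ∧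
        (w.drop h).reverse = PySem.List.sorted ((w.drop h).reverse) (fun c => c) false
    · rw [if_pos hc] at HA
      obtain ⟨hc1, hc2⟩ := hc
      rw [pv_sorted_self_iff, pv_pairwise_iff_adj] at hc1 hc2
      rw [pv_loopA_iff _ _ (by omega) 0] at HA
      -- B's three scans all succeed
      rw [if_neg, if_neg]
      · simp only [List.all_eq_true, List.mem_range'_1, decide_eq_true_eq]
        rintro j ⟨hj1, hj2⟩
        have h1 : j + 1 < n := by omega
        have hi : n - 2 - j + 1 < (w.drop h).reverse.length := by omega
        have := hc2 (n - 2 - j) (by omega)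
        rw [pv_getD_eq _ _ (by omega), pv_getD_eq _ _ (by omega)] at this
        simp only [List.getElem_reverse, List.getElem_drop, hdl] at this
        rw [pv_getD_eq _ _ (by omega), pv_getD_eq _ _ (by omega)]
        have e1 : n - h - 1 - (n - 2 - j) - 1 + h = j := by omega
        have e2 : n - h - 1 - (n - 2 - j) + h = j + 1 := by omega
        -- this : w[h + (n-h-1-(n-2-j+1))] ≤ w[h + (n-h-1-(n-2-j))]
        convert this using 2 <;> omega
      · simp only [List.any_eq_true, List.mem_range, decide_eq_true_eq, not_exists, not_and, not_lt]
        intro i hi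
        have := hc1 i (by omega)
        rw [pv_getD_eq _ _ (by omega), pv_getD_eq _ _ (by omega)] at this
        simp only [List.getElem_take] at this
        rw [pv_getD_eq _ _ (by omega), pv_getD_eq _ _ (by omega)]
        exact this
      · simp only [List.any_eq_true, List.mem_range, not_exists, not_and, Bool.not_eq_eq_eq_not,
          Bool.not_true, beq_eq_false_iff_ne, ne_eq, not_not]
        intro i hi
        have := HA i (Nat.zero_le i) (by omega)
        rw [pv_getD_eq _ _ (by omega), pv_getD_eq _ _ (by omega)] at this
        simp only [List.getElem_take, List.getElem_drop, hdl] at this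
        rw [pv_getD_eq _ _ (by omega), pv_getD_eq _ _ (by omega)]
        rw [this]
        congr 1
        omega
    · rw [if_neg hc] at HA
      exact absurd HA (by simp)
  · intro HB
    -- B returned true: none of the scans failed
    by_cases h1 : (List.range h).any (fun i => !(w.getD i ' ' == w.getD (n - 1 - i) ' ')) = true
    · rw [if_pos h1] at HB; exact absurd HB (by simp)
    by_cases h2 : (List.range (h - 1)).any (fun i => decide (w.getD (i + 1) ' ' < w.getD i ' ')) = true
    · rw [if_neg h1, if_pos h2] at HB; exact absurd HB (by simp)
    rw [if_neg h1, if_neg h2] at HB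
    simp only [List.any_eq_true, List.mem_range, not_exists, not_and, Bool.not_eq_eq_eq_not,
      Bool.not_true, beq_eq_false_iff_ne, ne_eq, not_not] at h1
    simp only [List.any_eq_true, List.mem_range, decide_eq_true_eq, not_exists, not_and,
      not_lt] at h2
    simp only [List.all_eq_true, List.mem_range'_1, decide_eq_true_eq] at HB
    rw [if_pos, pv_loopA_iff _ _ (by omega) 0]
    · intro i _ hi
      rw [htl] at hi
      have := h1 i hi
      rw [pv_getD_eq _ _ (by omega), pv_getD_eq _ _ (by omega)] at this
      rw [pv_getD_eq _ _ (by omega), pv_getD_eq _ _ (by omega)]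
      simp only [List.getElem_take, List.getElem_drop, hdl]
      rw [this]
      congr 1
      omega
    · constructor
      · rw [pv_sorted_self_iff, pv_pairwise_iff_adj]
        intro i hi
        rw [htl] at hi
        have := h2 i (by omega)
        rw [pv_getD_eq _ _ (by omega), pv_getD_eq _ _ (by omega)] at this
        rw [pv_getD_eq _ _ (by omega), pv_getD_eq _ _ (by omega)]
        simpa [List.getElem_take] using this
      · rw [pv_sorted_self_iff, pv_pairwise_iff_adj]
        intro i hi
        rw [hrl] at hi
        have := HB (h + (n - h - 1 - (i + 1))) ⟨by omega, by omega⟩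
        rw [pv_getD_eq _ _ (by omega), pv_getD_eq _ _ (by omega)] at this
        rw [pv_getD_eq _ _ (by omega), pv_getD_eq _ _ (by omega)]
        simp only [List.getElem_reverse, List.getElem_drop, hdl]
        convert this using 2
        omega

-- ===== VERDICT (by name: the statement is the Claim_ definition above) =====
theorem is_sorted_polyndrom_spec : Claim_equal_is_sorted_polyndrom := by
  intro word _
  unfold Spec_is_sorted_polyndrom
  exact is_sorted_polyndrom_eq word
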